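-- pv_equiv track=rewrite | github.com/FiniteStateInc/customer-resources | 01-onboarding-and-scanning/utilities/manage_users.py | filter_users_for_deactivation
-- ===== SOURCE A (Python) =====
-- from typing import List, Optional, Tuple
--
-- def user_matches_exclusion(user: dict, exclusions: List[str]) -> bool:
--     """Check if a user matches any exclusion pattern.
--
--     Args:
--         user: User dictionary
--         exclusions: List of exclusion patterns. Can be:
--             - Email domain (e.g., "@finitestate.io", "@example.com")
--             - Full email address (e.g., "admin@example.com")
--             - User ID (e.g., "user123")
--
--     Returns:
--         True if user matches any exclusion pattern, False otherwise
--     """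
--     if not exclusions:
--         return False
--
--     email = user.get("email", "").lower()
--     user_id = user.get("userId", "").lower()
--
--     for exclusion in exclusions:
--         exclusion_lower = exclusion.lower().strip()
--
--         # Check full email match
--         if exclusion_lower == email:
--             return True
--
--         # Check email domain match (starts with @)
--         if exclusion_lower.startswith("@"):
--             if email.endswith(exclusion_lower):
--                 return True
--
--         # Check user ID match
--         if exclusion_lower == user_id:
--             return True
--
--     return False
--
-- def filter_users_for_deactivation(users: List[dict], exclusions: Optional[List[str]] = None) -> Tuple[List[dict], List[dict]]:
--     """Filter users to identify which should be deactivated.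
--
--     Args:
--         users: List of all users
--         exclusions: List of exclusion patterns (email domains, emails, or user IDs)
--
--     Returns:
--         Tuple of (users_to_deactivate, excluded_users)
--     """
--     if exclusions is None:
--         exclusions = []
--
--     users_to_deactivate = []
--     excluded_users = []
--
--     for user in users:
--         email = user.get("email", "")
--         status = user.get("status", "")
--         user_id = user.get("userId", "")
--
--         # Skip users that are already disabled
--         if status == "DISABLED":
--             continue
--
--         # Check if user matches any exclusion pattern
--         if user_matches_exclusion(user, exclusions):
--             excluded_users.append(user)
--         else:
--             users_to_deactivate.append(user)
--
--     return users_to_deactivate, excluded_users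
-- ===== SOURCE B (Python) =====
-- from typing import List, Optional, Tuple
--
-- def filter_users_for_deactivation(users: List[dict], exclusions: Optional[List[str]] = None) -> Tuple[List[dict], List[dict]]:
--     # Inverted loop nesting: stage 1 keeps the non-disabled users; stage 2 walks the
--     # exclusion patterns (each normalized exactly once) and marks the indices of
--     # matching users in a set; stage 3 splits the staged list by marked index.
--     active = [u for u in users if u.get("status", "") != "DISABLED"]
--     marked = set()
--     for exclusion in (exclusions or []):
--         p = exclusion.lower().strip()
--         for i, u in enumerate(active):
--             if i in marked:
--                 continue
--             email = u.get("email", "").lower()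
--             if p == email or (p.startswith("@") and email.endswith(p)) or p == u.get("userId", "").lower():
--                 marked.add(i)
--     return ([u for i, u in enumerate(active) if i not in marked],
--             [u for i, u in enumerate(active) if i in marked])
-- ===== Notes on version B (the rewrite author's own statement) =====
-- stated objective: alternative
-- what changed: B inverts the loop nesting: it first filters out DISABLED users, then iterates over the exclusion patterns (normalizing each exactly once) marking the indices of matching users in a set, and finally splits the staged active list by marked index, instead of A's single pass over users with a per-user rescan of every raw pattern.
import Mathlib
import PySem

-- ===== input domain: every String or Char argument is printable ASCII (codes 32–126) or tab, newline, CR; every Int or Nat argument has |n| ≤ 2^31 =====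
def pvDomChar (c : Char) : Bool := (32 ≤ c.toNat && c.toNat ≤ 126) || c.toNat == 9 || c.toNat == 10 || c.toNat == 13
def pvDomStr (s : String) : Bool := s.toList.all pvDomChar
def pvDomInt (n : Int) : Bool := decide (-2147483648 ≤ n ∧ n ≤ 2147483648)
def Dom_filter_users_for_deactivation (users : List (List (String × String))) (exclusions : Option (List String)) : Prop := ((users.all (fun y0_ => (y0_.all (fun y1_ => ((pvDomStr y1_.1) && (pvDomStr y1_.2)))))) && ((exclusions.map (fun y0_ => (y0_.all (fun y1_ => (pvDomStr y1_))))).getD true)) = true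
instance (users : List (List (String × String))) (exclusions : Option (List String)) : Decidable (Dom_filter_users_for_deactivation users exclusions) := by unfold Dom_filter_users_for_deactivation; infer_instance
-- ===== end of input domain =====

-- B inverts the loop nesting: it stages the non-DISABLED users, marks indices of users matching
-- any exclusion pattern (each normalized once) in a set, then splits by marked index (alternative decomposition, not claimed faster).


-- user.get(k, "") on the dict-as-association-list (first match)
def pvUserGet (user : List (String × String)) (k : String) : String :=
  PySem.Dict.getD (PySem.Dict.mk user) k ""

-- ===== PORT A =====
-- the 'for exclusion in exclusions' loop of user_matches_exclusion (early return → recursion)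
def pvUmeLoop (email user_id : String) : List String → Bool
  | [] => false
  | exclusion :: rest =>
    let exclusion_lower := PySem.Str.strip (PySem.Str.lower exclusion)
    if exclusion_lower == email then true
    else if PySem.Str.startswith exclusion_lower "@" && PySem.Str.endswith email exclusion_lower then true
    else if exclusion_lower == user_id then true
    else pvUmeLoop email user_id rest

def user_matches_exclusion (user : List (String × String)) (exclusions : List String) : Bool :=
  if exclusions.isEmpty then false
  else
    let email := PySem.Str.lower (pvUserGet user "email")
    let user_id := PySem.Str.lower (pvUserGet user "userId")
    pvUmeLoop email user_id exclusions

def filter_users_for_deactivation (users : List (List (String × String))) (exclusions : Option (List String)) : (List (List (String × String))) × (List (List (String × String))) :=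
  let exclusions := exclusions.getD []
  users.foldl (fun acc user =>
    let _email := pvUserGet user "email"
    let status := pvUserGet user "status"
    let _user_id := pvUserGet user "userId"
    if status == "DISABLED" then acc
    else if user_matches_exclusion user exclusions then (acc.1, acc.2 ++ [user])
    else (acc.1 ++ [user], acc.2)) ([], [])

-- ===== PORT B =====
-- one normalized pattern p against one user (the inner test of B's marking loop)
def pvMatch1 (p : String) (u : List (String × String)) : Bool :=
  let email := PySem.Str.lower (pvUserGet u "email")
  p == email || (PySem.Str.startswith p "@" && PySem.Str.endswith email p)
    || p == PySem.Str.lower (pvUserGet u "userId")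

def filter_users_for_deactivation_alt (users : List (List (String × String))) (exclusions : Option (List String)) : (List (List (String × String))) × (List (List (String × String))) :=
  let active := users.filter (fun u => !(pvUserGet u "status" == "DISABLED"))
  let marked : PySem.Set Int :=
    (exclusions.getD []).foldl (fun s exclusion =>
      let p := PySem.Str.strip (PySem.Str.lower exclusion)
      (PySem.List.enumerate active 0).foldl (fun s iu =>
        if PySem.Set.contains s iu.1 then s
        else if pvMatch1 p iu.2 then PySem.Set.add s iu.1
        else s) s) PySem.Set.empty
  (((PySem.List.enumerate active 0).filter (fun iu => !(PySem.Set.contains marked iu.1))).map (·.2),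
   ((PySem.List.enumerate active 0).filter (fun iu => PySem.Set.contains marked iu.1)).map (·.2))

-- ===== PRECONDITION & SPEC =====
def Spec_filter_users_for_deactivation (users : List (List (String × String))) (exclusions : Option (List String)) (out : (List (List (String × String))) × (List (List (String × String)))) : Prop := out = filter_users_for_deactivation_alt users exclusions
instance (users : List (List (String × String))) (exclusions : Option (List String)) (out : (List (List (String × String))) × (List (List (String × String)))) : Decidable (Spec_filter_users_for_deactivation users exclusions out) := by unfold Spec_filter_users_for_deactivation; infer_instance

-- ===== CLAIM (what is proved, stated in full; the proofs are below) =====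
def Claim_equal_filter_users_for_deactivation : Prop := ∀ (users : List (List (String × String))) (exclusions : Option (List String)), Dom_filter_users_for_deactivation users exclusions → Spec_filter_users_for_deactivation users exclusions (filter_users_for_deactivation users exclusions)

-- ===== LEMMAS AND PROOFS =====

-- A's scan of one user over the raw patterns is 'some pattern matches after normalization'
theorem pvUmeLoop_eq_any (email user_id : String) (l : List String) :
    pvUmeLoop email user_id l =
      l.any (fun e =>
        let el := PySem.Str.strip (PySem.Str.lower e)
        el == email || (PySem.Str.startswith el "@" && PySem.Str.endswith email el) || el == user_id) := by
  induction l with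
  | nil => rfl
  | cons e rest ih =>
    simp only [pvUmeLoop, List.any_cons, ih]
    split_ifs with h1 h2 h3 <;> simp_all

theorem user_matches_eq_any (user : List (String × String)) (l : List String) :
    user_matches_exclusion user l =
      l.any (fun e => pvMatch1 (PySem.Str.strip (PySem.Str.lower e)) user) := by
  unfold user_matches_exclusion pvMatch1
  by_cases hl : l.isEmpty
  · rw [List.isEmpty_iff] at hl
    subst hl
    simp
  · simp only [hl, Bool.false_eq_true, if_false, pvUmeLoop_eq_any]

-- membership after B's inner marking pass over one normalized pattern
theorem mem_innerFold (p : String) (l : List (Int × List (String × String))) :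
    ∀ (s : PySem.Set Int) (i : Int),
      i ∈ l.foldl (fun s iu =>
        if PySem.Set.contains s iu.1 then s
        else if pvMatch1 p iu.2 then PySem.Set.add s iu.1
        else s) s ↔ i ∈ s ∨ ∃ iu ∈ l, iu.1 = i ∧ pvMatch1 p iu.2 = true := by
  induction l with
  | nil => simp
  | cons a rest ih =>
    intro s i
    rw [List.foldl_cons, ih]
    by_cases hc : PySem.Set.contains s a.1
    · have ha : a.1 ∈ s := by
        simpa [PySem.Set.contains] using hc
      simp only [hc, if_true, List.mem_cons]
      constructor
      · rintro (h | h)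
        · exact Or.inl h
        · exact Or.inr ⟨h.choose, Or.inr h.choose_spec.1, h.choose_spec.2⟩
      · rintro (h | ⟨iu, hiu | hiu, h1, h2⟩)
        · exact Or.inl h
        · subst hiu; exact Or.inl (h1 ▸ ha)
        · exact Or.inr ⟨iu, hiu, h1, h2⟩
    · simp only [hc, Bool.false_eq_true, if_false, List.mem_cons]
      by_cases hm : pvMatch1 p a.2
      · simp only [hm, if_true, PySem.Set.mem_add]
        constructor
        · rintro ((h | h) | ⟨iu, hiu, h1, h2⟩)
          · exact Or.inl h
          · exact Or.inr ⟨a, Or.inl rfl, h.symm, hm⟩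
          · exact Or.inr ⟨iu, Or.inr hiu, h1, h2⟩
        · rintro (h | ⟨iu, hiu | hiu, h1, h2⟩)
          · exact Or.inl (Or.inl h)
          · subst hiu; exact Or.inl (Or.inr h1.symm)
          · exact Or.inr ⟨iu, hiu, h1, h2⟩
      · simp only [hm, Bool.false_eq_true, if_false]
        constructor
        · rintro (h | ⟨iu, hiu, h1, h2⟩)
          · exact Or.inl h
          · exact Or.inr ⟨iu, Or.inr hiu, h1, h2⟩
        · rintro (h | ⟨iu, hiu | hiu, h1, h2⟩)
          · exact Or.inl h
          · subst hiu; rw [h2] at hm; exact absurd rfl hm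
          · exact Or.inr ⟨iu, hiu, h1, h2⟩

-- membership in B's final marked set
theorem mem_markedFold (excl : List String) (active : List (List (String × String))) :
    ∀ (s : PySem.Set Int) (i : Int),
      i ∈ excl.foldl (fun s exclusion =>
        let p := PySem.Str.strip (PySem.Str.lower exclusion)
        (PySem.List.enumerate active 0).foldl (fun s iu =>
          if PySem.Set.contains s iu.1 then s
          else if pvMatch1 p iu.2 then PySem.Set.add s iu.1
          else s) s) s ↔
      i ∈ s ∨ ∃ e ∈ excl, ∃ iu ∈ PySem.List.enumerate active 0,
        iu.1 = i ∧ pvMatch1 (PySem.Str.strip (PySem.Str.lower e)) iu.2 = true := by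
  induction excl with
  | nil => simp
  | cons e rest ih =>
    intro s i
    rw [List.foldl_cons, ih, mem_innerFold]
    constructor
    · rintro ((h | ⟨iu, hiu, h1, h2⟩) | ⟨e', he', hrest⟩)
      · exact Or.inl h
      · exact Or.inr ⟨e, List.mem_cons_self, iu, hiu, h1, h2⟩
      · exact Or.inr ⟨e', List.mem_cons_of_mem _ he', hrest⟩
    · rintro (h | ⟨e', he', hrest⟩)
      · exact Or.inl (Or.inl h)
      · rcases List.mem_cons.mp he' with rfl | he''
        · exact Or.inl (Or.inr hrest)
        · exact Or.inr ⟨e', he'', hrest⟩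

-- for (k, u) in enumerate(active), k is marked iff u matches some pattern
theorem contains_marked_iff (excl : List String) (active : List (List (String × String)))
    (k : Nat) (hk : k < active.length) :
    PySem.Set.contains
      (excl.foldl (fun s exclusion =>
        let p := PySem.Str.strip (PySem.Str.lower exclusion)
        (PySem.List.enumerate active 0).foldl (fun s iu =>
          if PySem.Set.contains s iu.1 then s
          else if pvMatch1 p iu.2 then PySem.Set.add s iu.1
          else s) s) PySem.Set.empty) (k : Int)
      = user_matches_exclusion active[k] excl := by
  rw [Bool.eq_iff_iff, user_matches_eq_any]
  have : PySem.Set.contains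
      (excl.foldl (fun s exclusion =>
        let p := PySem.Str.strip (PySem.Str.lower exclusion)
        (PySem.List.enumerate active 0).foldl (fun s iu =>
          if PySem.Set.contains s iu.1 then s
          else if pvMatch1 p iu.2 then PySem.Set.add s iu.1
          else s) s) PySem.Set.empty) (k : Int) = true
      ↔ ((k : Int) ∈ excl.foldl (fun s exclusion =>
        let p := PySem.Str.strip (PySem.Str.lower exclusion)
        (PySem.List.enumerate active 0).foldl (fun s iu =>
          if PySem.Set.contains s iu.1 then s
          else if pvMatch1 p iu.2 then PySem.Set.add s iu.1
          else s) s) PySem.Set.empty) := by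
    simp [PySem.Set.contains]
  rw [this, mem_markedFold]
  simp only [PySem.Set.empty, List.not_mem_nil, false_or, List.any_eq_true]
  constructor
  · rintro ⟨e, he, iu, hiu, h1, h2⟩
    rw [PySem.List.mem_enumerate_iff] at hiu
    obtain ⟨j, hj, rfl⟩ := hiu
    simp only [zero_add] at h1
    have : j = k := by exact_mod_cast h1
    subst this
    exact ⟨e, he, h2⟩
  · rintro ⟨e, he, h2⟩
    refine ⟨e, he, ((k : Int), active[k]), ?_, rfl, h2⟩
    rw [PySem.List.mem_enumerate_iff]
    exact ⟨k, hk, by simp⟩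

-- filtering enumerate(l) by a predicate on the element, then projecting, is filtering l
theorem filter_enum_aux (l : List (List (String × String)))
    (p : List (String × String) → Bool) :
    ∀ (s : Int), ((PySem.List.enumerate l s).filter (fun iu => p iu.2)).map (·.2) = l.filter p := by
  induction l with
  | nil => intro s; rfl
  | cons x xs ih =>
    intro s
    rw [PySem.List.enumerate_cons]
    by_cases hx : p x <;> simp [hx, ih (s + 1)]

theorem filter_enumerate_map_snd (l : List (List (String × String)))
    (p : List (String × String) → Bool)
    (q : Int × List (String × String) → Bool)
    (hq : ∀ iu ∈ PySem.List.enumerate l 0, q iu = p iu.2) :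
    ((PySem.List.enumerate l 0).filter q).map (·.2) = l.filter p := by
  rw [List.filter_congr hq]
  exact filter_enum_aux l p 0

-- A's loop body, lets reduced (definitionally equal to the lambda in the port)
def pvStepA (excl : List String) (acc : (List (List (String × String))) × (List (List (String × String)))) (user : List (String × String)) : (List (List (String × String))) × (List (List (String × String))) :=
  if pvUserGet user "status" == "DISABLED" then acc
  else if user_matches_exclusion user excl then (acc.1, acc.2 ++ [user])
  else (acc.1 ++ [user], acc.2)

theorem pvStepA_foldl (excl : List String) (l : List (List (String × String))) :
    ∀ (a b : List (List (String × String))),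
      l.foldl (pvStepA excl) (a, b) =
      (a ++ (l.filter (fun u => !(pvUserGet u "status" == "DISABLED"))).filter
          (fun u => !user_matches_exclusion u excl),
       b ++ (l.filter (fun u => !(pvUserGet u "status" == "DISABLED"))).filter
          (fun u => user_matches_exclusion u excl)) := by
  induction l with
  | nil => simp
  | cons x xs ih =>
    intro a b
    rw [List.foldl_cons]
    by_cases hd : (pvUserGet x "status" == "DISABLED") = true
    · rw [show pvStepA excl (a, b) x = (a, b) from by simp [pvStepA, hd], ih]
      simp [hd]
    · by_cases hm : user_matches_exclusion x excl = true
      · rw [show pvStepA excl (a, b) x = (a, b ++ [x]) from by simp [pvStepA, hd, hm], ih]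
        simp [hd, hm]
      · rw [show pvStepA excl (a, b) x = (a ++ [x], b) from by simp [pvStepA, hd, hm], ih]
        simp [hd, hm]

-- A's accumulator loop is a filter-partition of the non-disabled users
theorem A_foldl_char (excl : List String) (l : List (List (String × String))) :
    ∀ (a b : List (List (String × String))),
      l.foldl (fun acc user =>
        let _email := pvUserGet user "email"
        let status := pvUserGet user "status"
        let _user_id := pvUserGet user "userId"
        if status == "DISABLED" then acc
        else if user_matches_exclusion user excl then (acc.1, acc.2 ++ [user])
        else (acc.1 ++ [user], acc.2)) (a, b) =
      (a ++ (l.filter (fun u => !(pvUserGet u "status" == "DISABLED"))).filter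
          (fun u => !user_matches_exclusion u excl),
       b ++ (l.filter (fun u => !(pvUserGet u "status" == "DISABLED"))).filter
          (fun u => user_matches_exclusion u excl)) := by
  have h : (fun (acc : (List (List (String × String))) × (List (List (String × String)))) user =>
      let _email := pvUserGet user "email"
      let status := pvUserGet user "status"
      let _user_id := pvUserGet user "userId"
      if status == "DISABLED" then acc
      else if user_matches_exclusion user excl then (acc.1, acc.2 ++ [user])
      else (acc.1 ++ [user], acc.2)) = pvStepA excl := rfl
  intro a b
  rw [h]
  exact pvStepA_foldl excl l a b

-- ===== VERDICT (by name: the statement is the Claim_ definition above) =====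
theorem filter_users_for_deactivation_spec : Claim_equal_filter_users_for_deactivation := by
  intro users exclusions _
  unfold Spec_filter_users_for_deactivation
  unfold filter_users_for_deactivation filter_users_for_deactivation_alt
  rw [A_foldl_char]
  simp only [List.nil_append, Prod.mk.injEq]
  constructor <;>
  · refine (filter_enumerate_map_snd _ _ _ (fun iu hiu => ?_)).symm
    rw [PySem.List.mem_enumerate_iff] at hiu
    obtain ⟨j, hj, rfl⟩ := hiu
    simp only [zero_add]
    rw [contains_marked_iff _ _ j hj]
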